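-- pv_equiv track=rewrite | github.com/drewbrew/advent-of-code-2018 | day08.py | calc_node_value
-- ===== SOURCE A (Python) =====
-- def calc_node_value(node_list):
--     """count node value for a node"""
--     # Yeah, I don't like the amount of duplicated code either, but I wasn't
--     # going for long-term maintainability here.
--     number_of_children = node_list.pop(0)
--     children_processed = 0
--     metadata_entries = node_list.pop(0)
--     metadata_total = 0
--     remaining_list = node_list[:]
--     if number_of_children == 0:
--         while metadata_entries > 0:
--             # we should just have metadata remaining. Pop it
--             metadata_total += remaining_list.pop(0)
--             metadata_entries -= 1
--         return metadata_total, remaining_list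
--     # use a dict rather than a list so we don't have to worry about off-by-one
--     # errors. It's not quite as memory-efficient, but it gets the job done
--     # for this puzzle case.
--     child_metadata = {}
--     while number_of_children > 0:
--         children_processed += 1
--         metadata_from_kid, remaining_list = calc_node_value(remaining_list)
--         child_metadata[children_processed] = metadata_from_kid
--         number_of_children -= 1
--     while metadata_entries > 0:
--         metadata_value = remaining_list.pop(0)
--         try:
--             # in part 1 we added this value to a running total
--             # whereas in this case, we need to look up the referenced child's
--             # node value (which is the sum of metadata *if* it has no children
--             # but is otherwise the sum of referenced children's metadata)
--             metadata_total += child_metadata[metadata_value]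
--         except KeyError:
--             # child doesn't exist. Don't care
--             pass
--         metadata_entries -= 1
--
--     # pass whatever data we haven't parsed back to the caller, which can decide
--     # whether that data is another node or just metadata
--     return metadata_total, remaining_list
-- ===== SOURCE B (Python) =====
-- def _parse_node(rest):
--     nc, nm = rest[0], rest[1]
--     return _parse_body(nc, nm, rest[2:])
--
--
-- def _parse_body(nc, nm, rest):
--     children = []
--     for _ in range(nc):
--         child, rest = _parse_node(rest)
--         children.append(child)
--     count = max(nm, 0)
--     return (nc, children, rest[:count]), rest[count:]
--
--
-- def _value(node):
--     nc, children, meta = node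
--     if nc == 0:
--         return sum(meta)
--     vals = [_value(c) for c in children]
--     return sum(vals[m - 1] for m in meta if 1 <= m <= len(vals))
--
--
-- def calc_node_value(node_list):
--     """count node value for a node"""
--     nc = node_list.pop(0)
--     nm = node_list.pop(0)
--     node, rest = _parse_body(nc, nm, node_list[:])
--     return _value(node), rest
-- ===== Notes on version B (the rewrite author's own statement) =====
-- stated objective: alternative
-- what changed: B separates parsing from evaluation: it first builds an explicit tree (header count, children list, metadata list) from the stream and then evaluates that tree with a 1-based child-value list, instead of A's single fused recursion that interleaves stream popping with a child-value dict and a try/except lookup.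
import Mathlib
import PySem

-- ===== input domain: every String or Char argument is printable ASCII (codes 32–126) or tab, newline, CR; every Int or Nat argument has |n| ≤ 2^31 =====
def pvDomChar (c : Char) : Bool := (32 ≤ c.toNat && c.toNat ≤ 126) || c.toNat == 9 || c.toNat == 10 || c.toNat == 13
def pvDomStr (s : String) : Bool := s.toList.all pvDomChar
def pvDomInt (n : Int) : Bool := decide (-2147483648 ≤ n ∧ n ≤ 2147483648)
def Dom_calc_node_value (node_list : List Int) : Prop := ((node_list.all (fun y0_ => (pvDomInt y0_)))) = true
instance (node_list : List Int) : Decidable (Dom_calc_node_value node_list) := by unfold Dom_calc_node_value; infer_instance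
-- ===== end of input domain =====

-- B re-implements A by a different decomposition (parse the stream into an explicit tree, then evaluate it)
-- instead of A's fused recursion over the stream with a child-value dict; equal cost, not claimed faster.
-- Both A and B pop exactly the first two elements off the caller's list (same observable mutation);
-- the equivalence proved here is about the return value.

-- ===== PORT A =====
-- leaf branch: while metadata_entries > 0: metadata_total += remaining_list.pop(0)
def pvMetaSumA (total : Int) (m : Int) (r : List Int) :
    Int × {r' : List Int // r'.length ≤ r.length} :=
  if m > 0 then
    match r with
    | [] => (total, ⟨[], by simp⟩)   -- Python raises IndexError here (outside Pre_)
    | x :: t =>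
      match pvMetaSumA (total + x) (m - 1) t with
      | (tot, ⟨r', h⟩) => (tot, ⟨r', by simp only [List.length_cons]; omega⟩)
  else (total, ⟨r, le_refl _⟩)
termination_by m.toNat
decreasing_by omega

-- internal branch: while metadata_entries > 0: pop, look up in child_metadata (KeyError ignored)
def pvMetaLookupA (total : Int) (m : Int) (d : PySem.Dict Int Int) (r : List Int) :
    Int × {r' : List Int // r'.length ≤ r.length} :=
  if m > 0 then
    match r with
    | [] => (total, ⟨[], by simp⟩)   -- Python raises IndexError here (outside Pre_)
    | x :: t =>
      let total' := match d.get? x with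
        | some v => total + v        -- try: metadata_total += child_metadata[x]
        | none => total              -- except KeyError: pass
      match pvMetaLookupA total' (m - 1) d t with
      | (tot, ⟨r', h⟩) => (tot, ⟨r', by simp only [List.length_cons]; omega⟩)
  else (total, ⟨r, le_refl _⟩)
termination_by m.toNat
decreasing_by omega

mutual
-- calc_node_value body: pop two header ints, copy, then leaf/internal branch
def pvCalcA (l : List Int) : Int × {r : List Int // r.length ≤ l.length} :=
  match l with
  | [] => (0, ⟨[], by simp⟩)         -- node_list.pop(0) raises IndexError (outside Pre_)
  | [_] => (0, ⟨[], by simp⟩)        -- second pop raises IndexError (outside Pre_)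
  | c :: m :: rest =>
    if c = 0 then
      match pvMetaSumA 0 m rest with
      | (tot, ⟨r, h⟩) => (tot, ⟨r, by simp only [List.length_cons]; omega⟩)
    else
      match pvChildLoopA c 0 PySem.Dict.empty rest with
      | (d, ⟨r1, h1⟩) =>
        match pvMetaLookupA 0 m d r1 with
        | (tot, ⟨r2, h2⟩) => (tot, ⟨r2, by simp only [List.length_cons]; omega⟩)
termination_by (l.length, 0)
decreasing_by
  apply Prod.Lex.left; simp only [List.length_cons]; omega

-- while number_of_children > 0: children_processed += 1; recurse; dict[children_processed] = value
def pvChildLoopA (n : Int) (cp : Int) (d : PySem.Dict Int Int) (r : List Int) :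
    PySem.Dict Int Int × {r' : List Int // r'.length ≤ r.length} :=
  if h : n > 0 then
    match pvCalcA r with
    | (v, ⟨r2, h2⟩) =>
      match pvChildLoopA (n - 1) (cp + 1) (d.insert (cp + 1) v) r2 with
      | (d', ⟨r3, h3⟩) => (d', ⟨r3, h3.trans h2⟩)
  else (d, ⟨r, le_refl _⟩)
termination_by (r.length + 1, n.toNat)
decreasing_by
  · apply Prod.Lex.left; omega
  · rcases Nat.lt_or_ge r2.length r.length with hlt | hge
    · apply Prod.Lex.left; omega
    · have he : r2.length = r.length := by omega
      rw [he]; apply Prod.Lex.right; omega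
end

def calc_node_value (node_list : List Int) : Int × List Int :=
  ((pvCalcA node_list).1, (pvCalcA node_list).2.val)

-- ===== PORT B =====
mutual
inductive PTree : Type
  | mk : Int → PTreeList → List Int → PTree
inductive PTreeList : Type
  | nil : PTreeList
  | cons : PTree → PTreeList → PTreeList
end

mutual
-- _parse_node: read the two header ints and parse the body
def pvParseNodeB (rest : List Int) : PTree × {r : List Int // r.length ≤ rest.length} :=
  match rest with
  | nc :: nm :: t =>
    match pvParseBodyB nc nm t with
    | (node, ⟨r, h⟩) => (node, ⟨r, by simp only [List.length_cons]; omega⟩)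
  | other => (PTree.mk 0 PTreeList.nil [], ⟨other, le_refl _⟩)  -- rest[0]/rest[1] raises IndexError (outside Pre_)
termination_by (rest.length, 0, 0)
decreasing_by
  apply Prod.Lex.left; simp only [List.length_cons]; omega

-- _parse_body: parse nc children, then take nm metadata by slicing
def pvParseBodyB (nc nm : Int) (rest : List Int) : PTree × {r : List Int // r.length ≤ rest.length} :=
  match pvParseChildrenB nc rest with
  | (children, ⟨r1, h1⟩) =>
    (PTree.mk nc children (PySem.List.slice r1 none (some (max nm 0))),   -- count = max(nm, 0); rest[:count]
     ⟨PySem.List.slice r1 (some (max nm 0)) none,                         -- rest[count:]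
      by rw [PySem.List.slice_some_none]; simp only [List.length_drop]; omega⟩)
termination_by (rest.length, 2, 0)
decreasing_by
  apply Prod.Lex.right; apply Prod.Lex.left; omega

-- the for _ in range(nc) loop collecting children
def pvParseChildrenB (k : Int) (rest : List Int) : PTreeList × {r : List Int // r.length ≤ rest.length} :=
  if h : k > 0 then
    match pvParseNodeB rest with
    | (child, ⟨r2, h2⟩) =>
      match pvParseChildrenB (k - 1) r2 with
      | (sibs, ⟨r3, h3⟩) => (PTreeList.cons child sibs, ⟨r3, h3.trans h2⟩)
  else (PTreeList.nil, ⟨rest, le_refl _⟩)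
termination_by (rest.length, 1, k.toNat)
decreasing_by
  · apply Prod.Lex.right; apply Prod.Lex.left; omega
  · rcases Nat.lt_or_ge r2.length rest.length with hlt | hge
    · apply Prod.Lex.left; omega
    · have he : r2.length = rest.length := by omega
      rw [he]; apply Prod.Lex.right; apply Prod.Lex.right; omega
end

mutual
-- _value: nc == 0 ⇒ sum(meta); else sum of vals[m-1] for m in meta if 1 <= m <= len(vals)
def pvValueB : PTree → Int
  | PTree.mk nc children md =>
    if nc = 0 then md.sum
    else
      let vals := pvValuesB children
      ((md.filter (fun m => decide (1 ≤ m) && decide (m ≤ (vals.length : Int)))).map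
        (fun m => (PySem.List.pyGet? vals (m - 1)).getD 0)).sum
def pvValuesB : PTreeList → List Int
  | PTreeList.nil => []
  | PTreeList.cons c t => pvValueB c :: pvValuesB t
end

def calc_node_value_alt (node_list : List Int) : Int × List Int :=
  match node_list with
  | nc :: nm :: t =>
    match pvParseBodyB nc nm t with
    | (node, ⟨r, _⟩) => (pvValueB node, r)
  | _ => (0, [])   -- node_list.pop(0) raises IndexError here (outside Pre_)

-- ===== PRECONDITION & SPEC =====
-- well-formedness of the data format: pvChkF fu k l succeeds iff l starts with k consecutive
-- well-formed node encodings whose child/metadata counts are all nonnegative, returning the rest;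
-- fu bounds the recursion depth (each node consumes at least two elements, so length + 1 is enough)
def pvChkF : Nat → Int → List Int → Option (List Int)
  | 0, _, _ => none
  | fu + 1, k, l =>
    if k ≤ 0 then some l
    else
      match l with
      | c :: m :: rest =>
        match pvChkF fu c rest with
        | some r =>
          if m.toNat ≤ r.length then pvChkF fu (k - 1) (r.drop m.toNat) else none
        | none => none
      | _ => none

-- Pre_ = node_list starts with one complete node encoding (child/metadata counts read the way
-- A consumes them, i.e. a non-positive count means zero items). This is exactly A's domain: it
-- excludes precisely the truncated streams on which A raises IndexError, nothing else.
def Pre_calc_node_value (node_list : List Int) : Prop :=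
  (pvChkF (node_list.length + 1) 1 node_list).isSome = true
instance (node_list : List Int) : Decidable (Pre_calc_node_value node_list) := by
  unfold Pre_calc_node_value; infer_instance

def pvWitness_calc_node_value : List Int := [2, 2, 0, 1, 5, 1, 1, 0, 2, 7, 9, 2, 1, 2]

def Spec_calc_node_value (node_list : List Int) (out : Int × List Int) : Prop := out = calc_node_value_alt node_list
instance (node_list : List Int) (out : Int × List Int) : Decidable (Spec_calc_node_value node_list out) := by unfold Spec_calc_node_value; infer_instance

-- ===== CLAIM (what is proved, stated in full; the proofs are below) =====
def Claim_equal_calc_node_value : Prop := ∀ (node_list : List Int), Dom_calc_node_value node_list → Pre_calc_node_value node_list → Spec_calc_node_value node_list (calc_node_value node_list)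

-- ===== LEMMAS AND PROOFS =====

-- proof-side checker carrying the length bound needed for the main induction
def pvChk (k : Int) (l : List Int) : Option {r : List Int // r.length ≤ l.length} :=
  if k ≤ 0 then some ⟨l, le_refl _⟩
  else
    match l with
    | c :: m :: rest =>
      match pvChk c rest with
      | some ⟨r, h⟩ =>
        if m.toNat ≤ r.length then
          match pvChk (k - 1) (r.drop m.toNat) with
          | some ⟨r2, h2⟩ =>
            some ⟨r2, by simp only [List.length_drop] at h2; simp only [List.length_cons]; omega⟩
          | none => none
        else none
      | none => none
    | _ => none
termination_by (l.length, k.toNat)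
decreasing_by
  · apply Prod.Lex.left; simp only [List.length_cons]; omega
  · apply Prod.Lex.left; simp only [List.length_drop, List.length_cons]; omega


-- proof-side wrapper: the checker's result as a plain list
def pvChkV (k : Int) (l : List Int) : Option (List Int) := (pvChk k l).map Subtype.val

lemma pvChkV_nonpos (k : Int) (l : List Int) (hk : k ≤ 0) : pvChkV k l = some l := by
  unfold pvChkV; rw [pvChk.eq_def]; simp [hk]

lemma pvChkV_inv (k : Int) (l : List Int) (r : List Int) (hk : 0 < k)
    (h : pvChkV k l = some r) :
    ∃ c m rest r1, l = c :: m :: rest ∧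
      pvChkV c rest = some r1 ∧ m.toNat ≤ r1.length ∧
      pvChkV (k - 1) (r1.drop m.toNat) = some r := by
  unfold pvChkV at h ⊢
  match l with
  | [] => rw [pvChk.eq_def] at h; simp [if_neg (by omega : ¬ k ≤ 0)] at h
  | [x] => rw [pvChk.eq_def] at h; simp [if_neg (by omega : ¬ k ≤ 0)] at h
  | c :: m :: rest =>
    rw [pvChk.eq_def] at h
    simp only [if_neg (by omega : ¬ k ≤ 0)] at h
    refine ⟨c, m, rest, ?_⟩
    rcases hr1 : pvChk c rest with _ | ⟨r1, hr1b⟩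
    · rw [hr1] at h; simp at h
    · rw [hr1] at h
      simp only at h
      split_ifs at h with hm
      · rcases hr2 : pvChk (k - 1) (r1.drop m.toNat) with _ | ⟨r2, hr2b⟩
        · rw [hr2] at h; simp at h
        · rw [hr2] at h; simp only [Option.map_some, Option.some.injEq] at h
          exact ⟨r1, rfl, by simp [hr1], hm, by simp [hr2, h]⟩
      · simp at h

lemma pvChkV_one (c m : Int) (rest r1 : List Int)
    (h1 : pvChkV c rest = some r1) (hlen : m.toNat ≤ r1.length) :
    pvChkV 1 (c :: m :: rest) = some (r1.drop m.toNat) := by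
  unfold pvChkV at h1 ⊢
  rw [pvChk.eq_def]
  rcases hr : pvChk c rest with _ | ⟨r1', hb⟩
  · rw [hr] at h1; simp at h1
  · rw [hr] at h1; simp only [Option.map_some, Option.some.injEq] at h1
    subst h1
    simp only [show ¬ (1:Int) ≤ 0 by omega, if_false, hr]
    rw [if_pos hlen, pvChk.eq_def]
    simp

lemma pvChkV_nil (k : Int) (hk : ¬ k ≤ 0) : pvChkV k [] = none := by
  unfold pvChkV; rw [pvChk.eq_def]; simp [hk]

lemma pvChkV_single (k x : Int) (hk : ¬ k ≤ 0) : pvChkV k [x] = none := by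
  unfold pvChkV; rw [pvChk.eq_def]; simp [hk]

lemma pvChkV_cons (k c m : Int) (rest : List Int) (hk : ¬ k ≤ 0) :
    pvChkV k (c :: m :: rest) =
      (match pvChkV c rest with
      | some r => if m.toNat ≤ r.length then pvChkV (k - 1) (r.drop m.toNat) else none
      | none => none) := by
  unfold pvChkV
  rw [pvChk.eq_def]
  rw [if_neg hk]
  rcases hr : pvChk c rest with _ | ⟨r, hb⟩
  · simp [hr]
  · simp only [hr, Option.map_some]
    by_cases hm : m.toNat ≤ r.length
    · simp only [if_pos hm]
      rcases hr2 : pvChk (k - 1) (r.drop m.toNat) with _ | ⟨r2, hb2⟩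
      · simp [hr2]
      · simp [hr2]
    · simp [hm]

lemma pvChkV_len (k : Int) (l : List Int) (r : List Int) (h : pvChkV k l = some r) :
    r.length ≤ l.length := by
  unfold pvChkV at h
  rcases hc : pvChk k l with _ | ⟨r', hb⟩
  · rw [hc] at h; simp at h
  · rw [hc] at h; simp only [Option.map_some, Option.some.injEq] at h; exact h ▸ hb

-- the computable checker agrees with the proof-side one when the depth bound covers the list
lemma pvChkF_eq : ∀ (fu : Nat) (k : Int) (l : List Int), l.length < fu →
    pvChkF fu k l = pvChkV k l := by
  intro fu
  induction fu with
  | zero => intro k l h; exact absurd h (by omega)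
  | succ fu ih =>
    intro k l hl
    by_cases hk : k ≤ 0
    · rw [pvChkV_nonpos k l hk]; simp [pvChkF, hk]
    · match l with
      | [] => rw [pvChkV_nil k hk]; simp [pvChkF, hk]
      | [x] => rw [pvChkV_single k x hk]; simp [pvChkF, hk]
      | c :: m :: rest =>
        rw [pvChkV_cons k c m rest hk]
        simp only [pvChkF, if_neg hk]
        have hrest : rest.length < fu := by simp only [List.length_cons] at hl; omega
        rw [ih c rest hrest]
        rcases hv : pvChkV c rest with _ | r
        · rfl
        · simp only
          by_cases hm : m.toNat ≤ r.length
          · simp only [if_pos hm]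
            have hrlen : r.length ≤ rest.length := pvChkV_len c rest r hv
            exact ih (k - 1) (r.drop m.toNat) (by simp only [List.length_drop]; omega)
          · simp [hm]

-- characterisation of the leaf metadata loop
lemma pvMetaSumA_spec (mN : Nat) : ∀ (total : Int) (r : List Int), mN ≤ r.length →
    pvMetaSumA total (mN : Int) r =
      (total + (r.take mN).sum, ⟨r.drop mN, by simp only [List.length_drop]; omega⟩) := by
  induction mN with
  | zero =>
    intro total r _
    rw [pvMetaSumA.eq_def]
    simp
  | succ n ih =>
    intro total r hlen
    match r with
    | [] => simp at hlen
    | x :: t =>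
      rw [pvMetaSumA.eq_def]
      rw [if_pos (by push_cast; omega : ((n+1 : Nat) : Int) > 0)]
      simp only
      rw [show ((n+1 : Nat) : Int) - 1 = (n : Int) by push_cast; ring]
      rw [ih (total + x) t (by simpa using hlen)]
      simp only [List.take_succ_cons, List.sum_cons, List.drop_succ_cons]
      refine Prod.ext ?_ (Subtype.ext ?_) <;> simp <;> ring

-- characterisation of the internal-node metadata loop
lemma pvMetaLookupA_spec (mN : Nat) : ∀ (total : Int) (d : PySem.Dict Int Int) (r : List Int),
    mN ≤ r.length →
    pvMetaLookupA total (mN : Int) d r =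
      (total + ((r.take mN).map (fun x => ((d.get? x).getD 0))).sum,
       ⟨r.drop mN, by simp only [List.length_drop]; omega⟩) := by
  induction mN with
  | zero =>
    intro total d r _
    rw [pvMetaLookupA.eq_def]
    simp
  | succ n ih =>
    intro total d r hlen
    match r with
    | [] => simp at hlen
    | x :: t =>
      rw [pvMetaLookupA.eq_def]
      rw [if_pos (by push_cast; omega : ((n+1 : Nat) : Int) > 0)]
      simp only
      rw [show ((n+1 : Nat) : Int) - 1 = (n : Int) by push_cast; ring]
      have harg : (match d.get? x with
          | some v => total + v
          | none => total) = total + (d.get? x).getD 0 := by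
        rcases d.get? x with _ | v <;> simp
      rw [harg, ih (total + (d.get? x).getD 0) d t (by simpa using hlen)]
      simp only [List.take_succ_cons, List.map_cons, List.sum_cons, List.drop_succ_cons]
      refine Prod.ext ?_ (Subtype.ext ?_) <;> simp <;> ring

-- wrappers for a possibly negative metadata count (the loops run zero times there)
lemma pvMetaSumA_spec' (m : Int) (total : Int) (r : List Int) (h : m.toNat ≤ r.length) :
    pvMetaSumA total m r =
      (total + (r.take m.toNat).sum, ⟨r.drop m.toNat, by simp only [List.length_drop]; omega⟩) := by
  by_cases hm : 0 ≤ m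
  · have hh := pvMetaSumA_spec m.toNat total r h
    rwa [Int.toNat_of_nonneg hm] at hh
  · have hm0 : m.toNat = 0 := by omega
    refine Prod.ext ?_ (Subtype.ext ?_)
    · rw [pvMetaSumA.eq_def, if_neg (by omega)]
      simp [hm0]
    · rw [pvMetaSumA.eq_def, if_neg (by omega)]
      simp [hm0]

lemma pvMetaLookupA_spec' (m : Int) (total : Int) (d : PySem.Dict Int Int) (r : List Int)
    (h : m.toNat ≤ r.length) :
    pvMetaLookupA total m d r =
      (total + ((r.take m.toNat).map (fun x => ((d.get? x).getD 0))).sum,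
       ⟨r.drop m.toNat, by simp only [List.length_drop]; omega⟩) := by
  by_cases hm : 0 ≤ m
  · have hh := pvMetaLookupA_spec m.toNat total d r h
    rwa [Int.toNat_of_nonneg hm] at hh
  · have hm0 : m.toNat = 0 := by omega
    refine Prod.ext ?_ (Subtype.ext ?_)
    · rw [pvMetaLookupA.eq_def, if_neg (by omega)]
      simp [hm0]
    · rw [pvMetaLookupA.eq_def, if_neg (by omega)]
      simp [hm0]

-- the dict A builds in its child loop, as a function of the child-value list
def pvPushDict (d : PySem.Dict Int Int) (cp : Int) : List Int → PySem.Dict Int Int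
  | [] => d
  | v :: t => pvPushDict (d.insert (cp + 1) v) (cp + 1) t

lemma pvPushDict_get? (vals : List Int) : ∀ (d : PySem.Dict Int Int) (cp x : Int),
    (pvPushDict d cp vals).get? x =
      if cp + 1 ≤ x ∧ x ≤ cp + (vals.length : Int) then some (vals.getD (x - cp - 1).toNat 0)
      else d.get? x := by
  induction vals with
  | nil =>
    intro d cp x
    rw [pvPushDict]
    rw [if_neg (by simp only [List.length_nil, Nat.cast_zero, add_zero]; omega)]
  | cons v t ih =>
    intro d cp x
    rw [pvPushDict, ih, PySem.Dict.get?_insert]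
    by_cases h1 : cp + 1 + 1 ≤ x ∧ x ≤ cp + 1 + (t.length : Int)
    · rw [if_pos h1, if_pos (by simp only [List.length_cons]; push_cast; omega)]
      have : (x - cp - 1).toNat = (x - (cp + 1) - 1).toNat + 1 := by omega
      rw [this, List.getD_cons_succ]
    · rw [if_neg h1]
      by_cases h2 : x = cp + 1
      · rw [if_pos h2, if_pos (by simp only [List.length_cons]; push_cast; omega)]
        have : (x - cp - 1).toNat = 0 := by omega
        rw [this, List.getD_cons_zero]
      · rw [if_neg h2, if_neg (by simp only [List.length_cons]; push_cast; omega)]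

lemma pv_filter_map_sum (p : Int → Bool) (f : Int → Int) : ∀ xs : List Int,
    ((xs.filter p).map f).sum = (xs.map (fun x => if p x then f x else 0)).sum := by
  intro xs
  induction xs with
  | nil => simp
  | cons x t ih =>
    by_cases h : p x <;> simp [List.filter_cons, h, ih]

theorem pv_main : ∀ (n : Nat), ∀ (l : List Int), l.length ≤ n →
    ((∀ rv, pvChkV 1 l = some rv →
      (pvParseNodeB l).2.val = rv ∧
      (pvCalcA l).1 = pvValueB (pvParseNodeB l).1 ∧
      (pvCalcA l).2.val = rv) ∧
     (∀ (k : Int) rv, pvChkV k l = some rv →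
      (pvParseChildrenB k l).2.val = rv ∧
      ∀ (cp : Int) (d : PySem.Dict Int Int),
        (pvChildLoopA k cp d l).1 =
          pvPushDict d cp (pvValuesB (pvParseChildrenB k l).1) ∧
        (pvChildLoopA k cp d l).2.val = rv)) := by
  intro n
  induction n using Nat.strong_induction_on with
  | _ n IH =>
  intro l hl
  rcases Nat.lt_or_ge l.length n with hlt | hge
  · exact IH l.length hlt l (le_refl _)
  have hln : l.length = n := by omega
  have hNode : ∀ rv, pvChkV 1 l = some rv →
      (pvParseNodeB l).2.val = rv ∧
      (pvCalcA l).1 = pvValueB (pvParseNodeB l).1 ∧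
      (pvCalcA l).2.val = rv := by
    intro rv hchk
    obtain ⟨c, m, rest, r1, hleq, hr1, hmn1, hrest⟩ :=
      pvChkV_inv 1 l rv one_pos hchk
    subst hleq
    rw [pvChkV_nonpos _ _ (by omega)] at hrest
    have hrv : rv = r1.drop m.toNat := by
      simpa using hrest.symm
    subst hrv
    have hrestlen : rest.length < n := by
      simp only [List.length_cons] at hln; omega
    have hChildRest := (IH rest.length hrestlen rest (le_refl _)).2
    obtain ⟨hPC2, hCL⟩ := hChildRest c r1 hr1
    rcases hpc : pvParseChildrenB c rest with ⟨children, r1', hr1'b⟩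
    have hr1' : r1 = r1' := by rw [hpc] at hPC2; exact hPC2.symm
    subst hr1'
    -- the B-side parse of this node
    have hbody1 : (pvParseBodyB c m rest).1 = PTree.mk c children (r1.take m.toNat) := by
      rw [pvParseBodyB.eq_def, hpc]
      simp only
      rw [PySem.List.slice_to _ (le_max_right m 0),
        show (max m 0).toNat = m.toNat by omega]
    have hbody2 : (pvParseBodyB c m rest).2.val = r1.drop m.toNat := by
      rw [pvParseBodyB.eq_def, hpc]
      simp only
      rw [PySem.List.slice_from _ (le_max_right m 0),
        show (max m 0).toNat = m.toNat by omega]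
    have hpn1 : (pvParseNodeB (c :: m :: rest)).1 = (pvParseBodyB c m rest).1 := by
      rw [pvParseNodeB.eq_def]
    have hpn2 : (pvParseNodeB (c :: m :: rest)).2.val = (pvParseBodyB c m rest).2.val := by
      rw [pvParseNodeB.eq_def]
    refine ⟨by rw [hpn2, hbody2], ?_, ?_⟩
    · -- values agree
      by_cases hc0 : c = 0
      · subst hc0
        have hr1rest : r1 = rest := by
          rw [pvChkV_nonpos 0 rest (le_refl _)] at hr1
          simpa using hr1.symm
        subst hr1rest
        have hms := pvMetaSumA_spec' m 0 r1 hmn1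
        rw [pvCalcA.eq_def]
        simp only [hms, if_true, show ((0:Int) = 0) = True by simp]
        rw [hpn1, hbody1]
        simp [pvValueB]
      · obtain ⟨hd1, hd2⟩ := hCL 0 PySem.Dict.empty
        have hd1' : (pvChildLoopA c 0 PySem.Dict.empty rest).1 =
            pvPushDict PySem.Dict.empty 0 (pvValuesB children) := by rw [hd1, hpc]
        have hml := pvMetaLookupA_spec' m 0
          ((pvChildLoopA c 0 PySem.Dict.empty rest).1) r1 hmn1
        rw [pvCalcA.eq_def]
        simp only [if_neg hc0]
        rw [hd2, hml]
        rw [hpn1, hbody1]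
        rw [pvValueB]
        rw [if_neg hc0]
        set vals := pvValuesB children with hvals
        rw [pv_filter_map_sum]
        rw [hd1']
        have hfun : (fun x : Int => ((pvPushDict PySem.Dict.empty 0 vals).get? x).getD 0) =
            (fun x : Int => if (decide (1 ≤ x) && decide (x ≤ (vals.length : Int))) = true
              then (PySem.List.pyGet? vals (x - 1)).getD 0 else 0) := by
          funext x
          rw [pvPushDict_get?]
          simp only [zero_add, sub_zero]
          by_cases h1 : 1 ≤ x ∧ x ≤ (vals.length : Int)
          · rw [if_pos h1]
            rw [if_pos (by simp [h1.1, h1.2])]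
            rw [PySem.List.pyGet?_of_nonneg _ (by omega : (0:Int) ≤ x - 1)]
            simp only [Option.getD_some]
            rw [List.getD_eq_getElem?_getD]
          · rw [if_neg h1]
            rw [if_neg (by simp only [Bool.and_eq_true, decide_eq_true_eq]; intro hx; exact h1 hx)]
            simp [PySem.Dict.get?_empty]
        rw [hfun]
        simp
    · -- remainders agree
      by_cases hc0 : c = 0
      · subst hc0
        have hr1rest : r1 = rest := by
          rw [pvChkV_nonpos 0 rest (le_refl _)] at hr1
          simpa using hr1.symm
        subst hr1rest
        have hms := pvMetaSumA_spec' m 0 r1 hmn1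
        rw [pvCalcA.eq_def]
        simp only [hms, if_true, show ((0:Int) = 0) = True by simp]
      · obtain ⟨hd1, hd2⟩ := hCL 0 PySem.Dict.empty
        have hml := pvMetaLookupA_spec' m 0
          ((pvChildLoopA c 0 PySem.Dict.empty rest).1) r1 hmn1
        rw [pvCalcA.eq_def]
        simp only [if_neg hc0]
        rw [hd2, hml]
  refine ⟨hNode, ?_⟩
  intro k rv hchk
  by_cases hk0 : k ≤ 0
  · rw [pvChkV_nonpos k l hk0] at hchk
    have hrv : l = rv := by simpa using hchk
    subst hrv
    have hpc : pvParseChildrenB k l = (PTreeList.nil, ⟨l, le_refl _⟩) := by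
      rw [pvParseChildrenB.eq_def]; simp only [dif_neg (by omega : ¬ k > 0)]
    refine ⟨by rw [hpc], ?_⟩
    intro cp d
    have hcl : pvChildLoopA k cp d l = (d, ⟨l, le_refl _⟩) := by
      rw [pvChildLoopA.eq_def]; simp only [dif_neg (by omega : ¬ k > 0)]
    rw [hcl, hpc]
    exact ⟨rfl, rfl⟩
  · have hkpos : 0 < k := by omega
    obtain ⟨c, m, rest, r1, hleq, hr1, hmlen, hrest⟩ :=
      pvChkV_inv k l rv hkpos hchk
    subst hleq
    have hone := pvChkV_one c m rest r1 hr1 hmlen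
    obtain ⟨hN1, hN2, hN3⟩ := hNode _ hone
    have hr1len : r1.length ≤ rest.length := pvChkV_len c rest r1 hr1
    have hr2len : (List.drop m.toNat r1).length < n := by
      simp only [List.length_cons] at hln
      simp only [List.length_drop]
      omega
    have hChildR2 := (IH _ hr2len (List.drop m.toNat r1) (le_refl _)).2
    obtain ⟨hPC2', hCL'⟩ := hChildR2 (k - 1) rv hrest
    have hlenOK : (List.drop m.toNat r1).length ≤ (c :: m :: rest).length := by
      simp only [List.length_drop, List.length_cons]; omega
    have hpnFull : pvParseNodeB (c :: m :: rest) =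
        ((pvParseNodeB (c :: m :: rest)).1, ⟨List.drop m.toNat r1, hlenOK⟩) :=
      Prod.ext rfl (Subtype.ext hN1)
    have hcaFull : pvCalcA (c :: m :: rest) =
        (pvValueB (pvParseNodeB (c :: m :: rest)).1, ⟨List.drop m.toNat r1, hlenOK⟩) :=
      Prod.ext hN2 (Subtype.ext hN3)
    constructor
    · rw [pvParseChildrenB.eq_def]
      simp only [dif_pos hkpos]
      rw [hpnFull]
      exact hPC2'
    · intro cp d
      have hlist : (pvParseChildrenB k (c :: m :: rest)).1 =
          PTreeList.cons (pvParseNodeB (c :: m :: rest)).1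
            (pvParseChildrenB (k - 1) (List.drop m.toNat r1)).1 := by
        conv_lhs => rw [pvParseChildrenB.eq_def]
        simp only [dif_pos hkpos]
        rw [hpnFull]
      obtain ⟨hA1, hA2⟩ := hCL' (cp + 1)
        (d.insert (cp + 1) (pvValueB (pvParseNodeB (c :: m :: rest)).1))
      rw [pvChildLoopA.eq_def]
      simp only [dif_pos hkpos]
      rw [hcaFull]
      constructor
      · show (pvChildLoopA (k - 1) (cp + 1)
            (d.insert (cp + 1) (pvValueB (pvParseNodeB (c :: m :: rest)).1))
            (List.drop m.toNat r1)).1 =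
          pvPushDict d cp (pvValuesB (pvParseChildrenB k (c :: m :: rest)).1)
        rw [hA1, hlist]
        rw [show pvValuesB (PTreeList.cons (pvParseNodeB (c :: m :: rest)).1
              (pvParseChildrenB (k - 1) (List.drop m.toNat r1)).1) =
            pvValueB (pvParseNodeB (c :: m :: rest)).1 ::
              pvValuesB (pvParseChildrenB (k - 1) (List.drop m.toNat r1)).1 from rfl]
        rw [pvPushDict]
      · show (pvChildLoopA (k - 1) (cp + 1)
            (d.insert (cp + 1) (pvValueB (pvParseNodeB (c :: m :: rest)).1))
            (List.drop m.toNat r1)).2.val = rv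
        exact hA2

-- ===== VERDICT (by name: the statement is the Claim_ definition above) =====
theorem calc_node_value_spec : Claim_equal_calc_node_value := by
  unfold Claim_equal_calc_node_value
  intro l hdom hpre
  unfold Spec_calc_node_value
  unfold Pre_calc_node_value at hpre
  rw [pvChkF_eq (l.length + 1) 1 l (by omega)] at hpre
  obtain ⟨rv, hchk⟩ := Option.isSome_iff_exists.mp hpre
  obtain ⟨hP, hV, hR⟩ := (pv_main l.length l (le_refl _)).1 _ hchk
  obtain ⟨c, m, rest, r1, hleq, hr1, hmlen, hrest⟩ :=
    pvChkV_inv 1 l _ one_pos hchk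
  subst hleq
  have h1 : (pvParseNodeB (c :: m :: rest)).1 = (pvParseBodyB c m rest).1 := by
    rw [pvParseNodeB.eq_def]
  have h2 : (pvParseNodeB (c :: m :: rest)).2.val = (pvParseBodyB c m rest).2.val := by
    rw [pvParseNodeB.eq_def]
  unfold calc_node_value calc_node_value_alt
  show ((pvCalcA (c :: m :: rest)).1, (pvCalcA (c :: m :: rest)).2.val) =
    (pvValueB (pvParseBodyB c m rest).1, (pvParseBodyB c m rest).2.val)
  refine Prod.ext ?_ ?_
  · simp only []
    rw [hV, h1]
  · simp only []
    rw [hR, ← h2, hP]
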